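-- pv_equiv track=rewrite | github.com/k-harada/AtCoder | ABC/ABC201-250/ABC216/F.py | solve
-- ===== SOURCE A (Python) =====
-- MOD = 998244353
--
-- def solve(n, a_list, b_list):
--     ab_list = [(a, b) for a, b in zip(a_list, b_list)]
--     ab_list_s = list(sorted(ab_list, key=lambda x: x[0]))
--     a_list_s = [ab[0] for ab in ab_list_s]
--     b_list_s = [ab[1] for ab in ab_list_s]
--     dp = [[0] * 5001 for _ in range(n + 1)]
--     dp[0][0] = 1
--     res = 0
--     for i in range(n):
--         for v in range(a_list_s[i] - b_list_s[i] + 1):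
--             res += dp[i][v]
--         res %= MOD
--         for v in range(5001):
--             dp[i + 1][v] = dp[i][v]
--         for v in range(5001 - b_list_s[i]):
--             dp[i + 1][v + b_list_s[i]] += dp[i][v]
--             dp[i + 1][v + b_list_s[i]] %= MOD
--     return res
-- ===== SOURCE B (Python) =====
-- MOD = 998244353
--
-- def solve(n, a_list, b_list):
--     # Maintain the CUMULATIVE distribution: cum[c] = number of subsets of the
--     # pairs processed so far whose b-sum is <= c (mod MOD).  The per-element
--     # contribution is then a single lookup cum[a-b] (no prefix-sum scan), and
--     # the update is cum'[c] = cum[c] + cum[c-b] built as a fresh comprehension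
--     # (no 2D table, no row copies, no in-place shift loop).
--     pairs = sorted(zip(a_list, b_list), key=lambda p: p[0])
--     cum = [1] * 5001
--     res = 0
--     for i in range(n):
--         a, b = pairs[i]
--         if a >= b:
--             res = (res + cum[a - b]) % MOD
--         cum = [(cum[c] + cum[c - b]) % MOD if c >= b else cum[c] for c in range(5001)]
--     return res
-- ===== Notes on version B (the rewrite author's own statement) =====
-- stated objective: alternative
-- what changed: B maintains a different DP invariant: instead of A's per-sum count table (an (n+1)x5001 2D array with a row copy, a forward shift-add pass and an O(a-b) prefix-sum scan per element), B keeps the cumulative distribution cum[c] = #subsets with b-sum <= c, so each element contributes by a single O(1) lookup cum[a-b] and the table is rebuilt by one comprehension cum'[c] = cum[c] + cum[c-b]; no 2D table, row copies or prefix scans.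
import Mathlib
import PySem

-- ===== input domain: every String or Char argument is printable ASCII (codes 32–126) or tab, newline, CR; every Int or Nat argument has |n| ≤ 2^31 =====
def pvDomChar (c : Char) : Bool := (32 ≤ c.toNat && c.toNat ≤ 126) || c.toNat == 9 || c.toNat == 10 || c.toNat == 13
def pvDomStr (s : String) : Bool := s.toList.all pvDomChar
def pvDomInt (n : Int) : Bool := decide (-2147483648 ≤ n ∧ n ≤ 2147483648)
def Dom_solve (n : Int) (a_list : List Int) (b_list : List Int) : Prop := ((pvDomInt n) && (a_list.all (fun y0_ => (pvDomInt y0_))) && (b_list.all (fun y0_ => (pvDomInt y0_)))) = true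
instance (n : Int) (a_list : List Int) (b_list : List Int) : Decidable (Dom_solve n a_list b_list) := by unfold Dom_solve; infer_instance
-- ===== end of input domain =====

-- B maintains a different DP invariant: the CUMULATIVE distribution cum[c] = #subsets with b-sum ≤ c
-- (single 1D array rebuilt by a comprehension, O(1) lookup per element) instead of A's per-sum count
-- table with row copies, shift-add passes and per-element prefix-sum scans.

-- ===== PORT A =====
def pvMOD : Int := 998244353

-- A's loop body over state (dp, res), index i; 2D cell access dp[r][c] is ported as
-- dp.getD r [] / List.set r with PySem.List.pyGetD/pySetD for the columns (row and column
-- indices are in range on Pre_solve; Python raises outside it).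
def AstepA (a_list_s b_list_s : List Int) (st : List (List Int) × Int) (i : Nat) : List (List Int) × Int :=
  let dp := st.1
  -- for v in range(a_list_s[i] - b_list_s[i] + 1): res += dp[i][v]  ;  res %= MOD
  let res1 := (PySem.List.pyRange 0 (a_list_s.getD i 0 - b_list_s.getD i 0 + 1) 1).foldl
      (fun r v => r + PySem.List.pyGetD (dp.getD i []) v 0) st.2
  let res2 := PySem.Int.mod res1 pvMOD
  -- for v in range(5001): dp[i+1][v] = dp[i][v]
  let dp1 := (PySem.List.pyRange 0 5001 1).foldl
      (fun d v => d.set (i+1) (PySem.List.pySetD (d.getD (i+1) []) v (PySem.List.pyGetD (d.getD i []) v 0))) dp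
  -- for v in range(5001 - b_list_s[i]): dp[i+1][v+b] = (dp[i+1][v+b] + dp[i][v]) % MOD
  let bi := b_list_s.getD i 0
  let dp2 := (PySem.List.pyRange 0 (5001 - bi) 1).foldl
      (fun d v => d.set (i+1) (PySem.List.pySetD (d.getD (i+1) [])
        (v + bi)
        (PySem.Int.mod (PySem.List.pyGetD (d.getD (i+1) []) (v + bi) 0
                        + PySem.List.pyGetD (d.getD i []) v 0) pvMOD))) dp1
  (dp2, res2)

def solve (n : Int) (a_list : List Int) (b_list : List Int) : Int :=
  let ab_list := a_list.zip b_list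
  let ab_list_s := PySem.List.sorted ab_list (fun x => x.1) false
  let a_list_s := ab_list_s.map (fun ab => ab.1)
  let b_list_s := ab_list_s.map (fun ab => ab.2)
  let dp : List (List Int) := List.replicate (n+1).toNat (List.replicate 5001 0)
  let dp := dp.set 0 (PySem.List.pySetD (dp.getD 0 []) 0 1)       -- dp[0][0] = 1
  ((List.range n.toNat).foldl (AstepA a_list_s b_list_s) (dp, 0)).2

-- ===== PORT B =====
-- B's loop body over state (cum, res), pair p = (a, b).
def BstepC (st : List Int × Int) (p : Int × Int) : List Int × Int :=
  -- if a >= b: res = (res + cum[a - b]) % MOD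
  let res := if p.2 ≤ p.1
    then PySem.Int.mod (st.2 + PySem.List.pyGetD st.1 (p.1 - p.2) 0) pvMOD
    else st.2
  -- cum = [(cum[c] + cum[c - b]) % MOD if c >= b else cum[c] for c in range(5001)]
  let cum := (List.range 5001).map (fun (c : Nat) =>
    if p.2 ≤ (c : Int)
    then PySem.Int.mod (PySem.List.pyGetD st.1 (c : Int) 0 + PySem.List.pyGetD st.1 ((c : Int) - p.2) 0) pvMOD
    else PySem.List.pyGetD st.1 (c : Int) 0)
  (cum, res)

def solve_alt (n : Int) (a_list : List Int) (b_list : List Int) : Int :=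
  let pairs := PySem.List.sorted (a_list.zip b_list) (fun p => p.1) false
  -- for i in range(n): a, b = pairs[i] ; …
  ((List.range n.toNat).foldl (fun (st : List Int × Int) (i : Nat) => BstepC st (PySem.List.pyGetD pairs (i : Int) (0, 0))) (List.replicate 5001 1, 0)).2

-- ===== PRECONDITION & SPEC =====
-- Exactly the inputs on which the Python A returns: for n outside 0..min(len), dp[0][0]=1 or
-- a_list_s[i] raises IndexError, and a processed pair (one of the n key-smallest) with b < 0 or
-- a - b > 5000 makes a column index of A leave 0..5000, raising IndexError.
def Pre_solve (n : Int) (a_list : List Int) (b_list : List Int) : Prop :=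
  0 ≤ n ∧ n ≤ a_list.length ∧ n ≤ b_list.length ∧
  ∀ p ∈ (PySem.List.sorted (a_list.zip b_list) (fun x => x.1) false).take n.toNat,
    0 ≤ p.2 ∧ p.1 - p.2 ≤ 5000
instance (n : Int) (a_list : List Int) (b_list : List Int) : Decidable (Pre_solve n a_list b_list) := by unfold Pre_solve; infer_instance

def pvWitness_solve : Int × List Int × List Int := (3, [2, 1, 4], [1, 0, 2])

def Spec_solve (n : Int) (a_list : List Int) (b_list : List Int) (out : Int) : Prop := out = solve_alt n a_list b_list
instance (n : Int) (a_list : List Int) (b_list : List Int) (out : Int) : Decidable (Spec_solve n a_list b_list out) := by unfold Spec_solve; infer_instance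

-- ===== CLAIM (what is proved, stated in full; the proofs are below) =====
def Claim_equal_solve : Prop := ∀ (n : Int) (a_list : List Int) (b_list : List Int), Dom_solve n a_list b_list → Pre_solve n a_list b_list → Spec_solve n a_list b_list (solve n a_list b_list)

-- ===== LEMMAS AND PROOFS =====

-- A loop writing only row k of a 2D table, reading row j (j ≠ k) and row k, is the corresponding
-- 1D fold on row k.
theorem foldl_set_row {α : Type} (l : List α) (dp : List (List Int)) (j k : Nat)
    (g : List Int → List Int → α → List Int) (hjk : j ≠ k) (hk : k < dp.length) :
    l.foldl (fun d v => d.set k (g (d.getD k []) (d.getD j []) v)) dp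
      = dp.set k (l.foldl (fun r v => g r (dp.getD j []) v) (dp.getD k [])) := by
  induction l generalizing dp with
  | nil =>
      simp only [List.foldl_nil]
      rw [List.getD_eq_getElem?_getD, List.getElem?_eq_getElem hk]
      simp [List.set_getElem_self]
  | cons x xs ih =>
      simp only [List.foldl_cons]
      rw [ih (dp.set k (g (dp.getD k []) (dp.getD j []) x)) (by simpa using hk)]
      rw [List.set_set]
      congr 1
      · have h1 : (dp.set k (g (dp.getD k []) (dp.getD j []) x)).getD j []
            = dp.getD j [] := by
          rw [List.getD_eq_getElem?_getD, List.getD_eq_getElem?_getD, List.getElem?_set]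
          rw [if_neg (fun h => hjk h.symm)]
          rw [List.getD_eq_getElem?_getD]
        have h2 : (dp.set k (g (dp.getD k []) (dp.getD j []) x)).getD k []
            = g (dp.getD k []) (dp.getD j []) x := by
          simp [List.getD_eq_getElem?_getD, List.getElem?_set, hk]
        rw [h1, h2]

-- set on a map-over-range, as a map-over-range
theorem set_map_range (n : Nat) (f : Nat → Int) (i : Nat) (v : Int) :
    ((List.range n).map f).set i v
      = (List.range n).map (fun c => if c = i then v else f c) := by
  apply List.ext_getElem (by simp)
  intro j h1 h2
  simp only [List.getElem_set, List.getElem_map, List.getElem_range]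
  split_ifs <;> first | rfl | omega

-- the copy loop: row k becomes the source row
theorem copy_fold (src : List Int) :
    ∀ (t : Nat) (dst : List Int), t ≤ 5001 → src.length = 5001 → dst.length = 5001 →
    (List.range t).foldl (fun d v => d.set v (src.getD v 0)) dst
      = src.take t ++ dst.drop t := by
  intro t
  induction t with
  | zero => intro dst _ _ _; simp
  | succ t ih =>
      intro dst ht hs hd
      rw [List.range_succ, List.foldl_append, ih dst (by omega) hs hd]
      simp only [List.foldl_cons, List.foldl_nil]
      have hts : t < src.length := by omega
      have htd : t < dst.length := by omega
      rw [List.set_append]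
      have hlen : (src.take t).length = t := by simp; omega
      rw [hlen, if_neg (by omega), Nat.sub_self]
      have hdrop : dst.drop t = dst[t] :: dst.drop (t+1) := List.drop_eq_getElem_cons htd
      rw [hdrop, List.set_cons_zero]
      have htake : src.take (t+1) = src.take t ++ [src[t]] := by
        rw [List.take_add_one, List.getElem?_eq_getElem hts]; rfl
      rw [htake, List.append_assoc, List.getD_eq_getElem?_getD, List.getElem?_eq_getElem hts]
      rfl

theorem map_getD_range (l : List Int) (h : l.length = 5001) :
    (List.range 5001).map (fun c => l.getD c 0) = l := by
  apply List.ext_getElem (by simp [h])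
  intro j h1 h2
  simp [List.getD_eq_getElem?_getD, List.getElem?_eq_getElem (by omega : j < l.length)]

theorem getD_set_eq_if {α : Type} (l : List α) (i j : Nat) (v d : α) (hi : i < l.length) :
    (l.set i v).getD j d = if j = i then v else l.getD j d := by
  by_cases h : j = i
  · subst h; simp [List.getD_eq_getElem?_getD, List.getElem?_set, hi]
  · rw [if_neg h, List.getD_eq_getElem?_getD, List.getD_eq_getElem?_getD, List.getElem?_set,
      if_neg (fun hh => h hh.symm)]

theorem getD_map_range_lt (f : Nat → Int) (c : Nat) (hc : c < 5001) :
    ((List.range 5001).map f).getD c 0 = f c := by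
  rw [List.getD_eq_getElem?_getD, List.getElem?_map, List.getElem?_range hc]
  rfl

-- the row update with offset β (A's copy + forward add pass, described pointwise)
def rowNext (β : Nat) (src : List Int) : List Int :=
  (List.range 5001).map (fun c =>
    if β ≤ c ∧ c < (5001 - β) + β
    then PySem.Int.mod (src.getD c 0 + src.getD (c - β) 0) pvMOD
    else src.getD c 0)

theorem add_fold_A_gen (β : Nat) (src : List Int) (hs : src.length = 5001) :
    ∀ (t : Nat), t ≤ 5001 - β →
    (List.range t).foldl
      (fun d v => d.set (v + β) (PySem.Int.mod (d.getD (v + β) 0 + src.getD v 0) pvMOD)) src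
    = (List.range 5001).map (fun c =>
        if β ≤ c ∧ c < t + β
        then PySem.Int.mod (src.getD c 0 + src.getD (c - β) 0) pvMOD
        else src.getD c 0) := by
  intro t
  induction t with
  | zero =>
      intro _
      rw [List.range_zero, List.foldl_nil]
      rw [show ((List.range 5001).map (fun c =>
        if β ≤ c ∧ c < 0 + β
        then PySem.Int.mod (src.getD c 0 + src.getD (c - β) 0) pvMOD
        else src.getD c 0)) = (List.range 5001).map (fun c => src.getD c 0) from
          List.map_congr_left (fun c _ => by rw [if_neg (by omega)])]
      exact (map_getD_range src hs).symm
  | succ t ih =>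
      intro ht
      rw [List.range_succ, List.foldl_append, ih (by omega)]
      simp only [List.foldl_cons, List.foldl_nil]
      have hlt : t + β < 5001 := by omega
      rw [getD_map_range_lt _ _ hlt, if_neg (by omega), set_map_range]
      apply List.map_congr_left
      intro c hc
      rw [List.mem_range] at hc
      by_cases h1 : c = t + β
      · subst h1
        rw [if_pos rfl, if_pos (by omega), Nat.add_sub_cancel]
      · rw [if_neg h1]
        by_cases h2 : β ≤ c ∧ c < t + β
        · rw [if_pos h2, if_pos (by omega)]
        · rw [if_neg h2, if_neg (by omega)]

-- A's add loop (reads the PREVIOUS row src, writes ascending into a copy of src)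
theorem add_fold_A (β : Nat) (src : List Int) (hs : src.length = 5001) :
    (List.range (5001 - β)).foldl
      (fun d v => d.set (v + β) (PySem.Int.mod (d.getD (v + β) 0 + src.getD v 0) pvMOD)) src
    = rowNext β src := by
  rw [add_fold_A_gen β src hs (5001 - β) le_rfl]
  rfl

theorem sum_take (l : List Int) (k : Nat) (r : Int) :
    (List.range k).foldl (fun acc c => acc + l.getD c 0) r = r + (l.take k).sum := by
  induction k generalizing r with
  | zero => simp
  | succ k ih =>
      rw [List.range_succ, List.foldl_append, List.take_add_one, List.sum_append, ih]
      simp only [List.foldl_cons, List.foldl_nil]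
      rw [List.getD_eq_getElem?_getD]
      cases l[k]? <;> simp <;> ring

theorem getD_map_lt {α β : Type} (f : α → β) (l : List α) (k : Nat) (d : β) (hk : k < l.length) :
    (l.map f).getD k d = f l[k] := by
  rw [List.getD_eq_getElem?_getD, List.getElem?_map, List.getElem?_eq_getElem hk]
  rfl

theorem length_rowNext (β : Nat) (src : List Int) : (rowNext β src).length = 5001 := by
  simp [rowNext]

-- A's loop body, described through rowNext
theorem Astep_eq (S : List (Int × Int)) (k : Nat) (hk : k < S.length)
    (dp : List (List Int)) (res : Int) (hdl : k + 1 < dp.length)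
    (hrow : (dp.getD k []).length = 5001) (hrow1 : (dp.getD (k+1) []).length = 5001)
    (hb : 0 ≤ S[k].2) :
    AstepA (S.map (fun ab => ab.1)) (S.map (fun ab => ab.2)) (dp, res) k
      = (dp.set (k+1) (rowNext (S[k].2).toNat (dp.getD k [])),
         PySem.Int.mod (res + ((dp.getD k []).take ((S[k].1 - S[k].2 + 1)).toNat).sum) pvMOD) := by
  obtain ⟨β, hβ⟩ : ∃ β : Nat, S[k].2 = (β : Int) := ⟨(S[k].2).toNat, (Int.toNat_of_nonneg hb).symm⟩
  unfold AstepA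
  dsimp only
  rw [getD_map_lt _ _ _ _ hk, getD_map_lt _ _ _ _ hk, hβ]
  have hrangeA : PySem.List.pyRange 0 (S[k].1 - (β:Int) + 1) 1
      = (List.range ((S[k].1 - (β:Int) + 1).toNat)).map (fun w => ((w : Nat) : Int)) := by
    rw [PySem.List.pyRange_one]
    simp
  have hrange5001 : PySem.List.pyRange 0 5001 1
      = (List.range 5001).map (fun w => ((w : Nat) : Int)) := by
    rw [PySem.List.pyRange_one]
    rw [show ((5001:Int) - 0).toNat = 5001 from rfl]
    simp
  have hrangeβ : PySem.List.pyRange 0 (5001 - (β:Int)) 1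
      = (List.range (5001 - β)).map (fun w => ((w : Nat) : Int)) := by
    rw [PySem.List.pyRange_one]
    rw [show ((5001 - (β:Int)) - 0).toNat = 5001 - β from by omega]
    simp
  rw [hrangeA, hrange5001, hrangeβ, List.foldl_map, List.foldl_map, List.foldl_map]
  simp only [← Nat.cast_add, PySem.List.pySetD_natCast, PySem.List.pyGetD_natCast]
  rw [foldl_set_row (List.range 5001) dp k (k+1)
      (fun r src w => r.set w (src.getD w 0)) (by omega) hdl]
  rw [copy_fold (dp.getD k []) 5001 (dp.getD (k+1) []) le_rfl hrow hrow1]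
  have hcopy : (dp.getD k []).take 5001 ++ (dp.getD (k+1) []).drop 5001 = dp.getD k [] := by
    rw [List.take_of_length_le (by omega), List.drop_eq_nil_of_le (by omega), List.append_nil]
  rw [hcopy]
  rw [foldl_set_row (List.range (5001 - β)) (dp.set (k+1) (dp.getD k [])) k (k+1)
      (fun r src w => r.set (w + β) (PySem.Int.mod (r.getD (w + β) 0 + src.getD w 0) pvMOD))
      (by omega) (by simpa using hdl)]
  have h1 : (dp.set (k+1) (dp.getD k [])).getD k [] = dp.getD k [] := by
    rw [getD_set_eq_if _ _ _ _ _ (by omega), if_neg (by omega)]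
  have h2 : (dp.set (k+1) (dp.getD k [])).getD (k+1) [] = dp.getD k [] := by
    rw [getD_set_eq_if _ _ _ _ _ (by omega), if_pos rfl]
  rw [h1, h2, add_fold_A β (dp.getD k []) hrow, List.set_set]
  rw [sum_take (dp.getD k []) ((S[k].1 - (β:Int) + 1).toNat) res]
  rw [Int.toNat_natCast]

-- ---- B-side description: cumulative distribution of a row ----
def cumOf (row : List Int) : List Int :=
  (List.range 5001).map (fun c => PySem.Int.mod ((row.take (c+1)).sum) pvMOD)

theorem take_succ_sum (l : List Int) (k : Nat) (hk : k < l.length) :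
    (l.take (k+1)).sum = (l.take k).sum + l.getD k 0 := by
  rw [List.take_add_one, List.sum_append, List.getD_eq_getElem?_getD,
    List.getElem?_eq_getElem hk]
  simp

theorem pymod_emod (a : Int) : PySem.Int.mod a pvMOD = a % pvMOD := by
  exact PySem.Int.mod_eq_emod_of_pos (by norm_num [pvMOD])

-- key modular fact: partial sums of rowNext are the partial sums of the row, shifted-added
theorem rowNext_take_sum (β : Nat) (row : List Int) (hr : row.length = 5001) :
    ∀ k, k ≤ 5001 →
      (((rowNext β row).take k).sum) % pvMOD
        = ((row.take k).sum + (row.take (k - β)).sum) % pvMOD := by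
  intro k
  induction k with
  | zero => simp
  | succ k ih =>
      intro hk
      have hkr : k < (rowNext β row).length := by rw [length_rowNext]; omega
      have hkl : k < row.length := by omega
      rw [take_succ_sum _ k hkr, take_succ_sum _ k hkl]
      have hget : (rowNext β row).getD k 0
          = if β ≤ k ∧ k < (5001 - β) + β
            then PySem.Int.mod (row.getD k 0 + row.getD (k - β) 0) pvMOD
            else row.getD k 0 := getD_map_range_lt _ k (by omega)
      by_cases hβk : β ≤ k
      · have hcond : β ≤ k ∧ k < (5001 - β) + β := ⟨hβk, by omega⟩
        rw [hget, if_pos hcond, pymod_emod]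
        have hsub : k + 1 - β = (k - β) + 1 := by omega
        rw [hsub, take_succ_sum row (k - β) (by omega)]
        calc (((rowNext β row).take k).sum + (row.getD k 0 + row.getD (k - β) 0) % pvMOD) % pvMOD
            = ((((rowNext β row).take k).sum) % pvMOD + ((row.getD k 0 + row.getD (k - β) 0) % pvMOD) % pvMOD) % pvMOD := by
              rw [← Int.add_emod]
          _ = (((row.take k).sum + (row.take (k - β)).sum) % pvMOD + (row.getD k 0 + row.getD (k - β) 0) % pvMOD) % pvMOD := by
              rw [ih (by omega), Int.emod_emod_of_dvd _ dvd_rfl]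
          _ = ((row.take k).sum + (row.take (k - β)).sum + (row.getD k 0 + row.getD (k - β) 0)) % pvMOD := by
              rw [← Int.add_emod]
          _ = ((row.take k).sum + row.getD k 0 + ((row.take (k - β)).sum + row.getD (k - β) 0)) % pvMOD := by
              ring_nf
      · have hsub : k + 1 - β = 0 := by omega
        have hsub2 : k - β = 0 := by omega
        rw [hget, if_neg (by omega), hsub]
        rw [hsub2] at ih
        simp only [List.take_zero, List.sum_nil, Int.add_zero] at ih ⊢
        calc (((rowNext β row).take k).sum + row.getD k 0) % pvMOD
            = ((((rowNext β row).take k).sum) % pvMOD + (row.getD k 0) % pvMOD) % pvMOD := by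
              rw [← Int.add_emod]
          _ = (((row.take k).sum) % pvMOD + (row.getD k 0) % pvMOD) % pvMOD := by
              rw [ih (by omega)]
          _ = ((row.take k).sum + row.getD k 0) % pvMOD := by rw [← Int.add_emod]

theorem getD_cumOf (row : List Int) (c : Nat) (hc : c < 5001) :
    (cumOf row).getD c 0 = PySem.Int.mod ((row.take (c+1)).sum) pvMOD :=
  getD_map_range_lt _ c hc

-- B's loop body maps cumOf row to cumOf (rowNext β row), and updates res like A does
set_option maxRecDepth 8192 in
theorem Bstep_cum (p : Int × Int) (row : List Int) (res : Int)
    (hrow : row.length = 5001) (hb : 0 ≤ p.2) (ha : p.1 - p.2 ≤ 5000)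
    (hres : PySem.Int.mod res pvMOD = res) :
    BstepC (cumOf row, res) p
      = (cumOf (rowNext p.2.toNat row),
         PySem.Int.mod (res + (row.take (p.1 - p.2 + 1).toNat).sum) pvMOD) := by
  obtain ⟨β, hβ⟩ : ∃ β : Nat, p.2 = (β : Int) := ⟨p.2.toNat, (Int.toNat_of_nonneg hb).symm⟩
  have hβt : p.2.toNat = β := by omega
  unfold BstepC
  dsimp only
  rw [Prod.mk.injEq]
  constructor
  -- the cum update
  · rw [hβt]
    unfold cumOf
    apply List.map_congr_left
    intro c hc
    rw [List.mem_range] at hc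
    have hR := rowNext_take_sum β row hrow (c+1) (by omega)
    rw [pymod_emod, hβ]
    by_cases hcb : β ≤ c
    · rw [if_pos (by exact_mod_cast hcb)]
      have hcast : (c : Int) - (β : Int) = ((c - β : Nat) : Int) := by omega
      rw [hcast]
      simp only [PySem.List.pyGetD_natCast]
      rw [getD_map_range_lt _ c hc, getD_map_range_lt _ (c - β) (by omega)]
      rw [pymod_emod, pymod_emod, pymod_emod]
      rw [hR, show c + 1 - β = (c - β) + 1 from by omega]
      rw [Int.add_emod ((row.take (c+1)).sum)]
    · rw [if_neg (by exact_mod_cast hcb)]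
      simp only [PySem.List.pyGetD_natCast]
      rw [getD_map_range_lt _ c hc, pymod_emod, pymod_emod, hR,
        show c + 1 - β = 0 from by omega]
      simp
  -- the res update
  · by_cases hab : p.2 ≤ p.1
    · rw [if_pos hab]
      have ht0 : 0 ≤ p.1 - p.2 := by omega
      rw [show (p.1 - p.2 + 1).toNat = (p.1 - p.2).toNat + 1 from by omega,
          show p.1 - p.2 = (((p.1 - p.2).toNat : Nat) : Int) from by omega,
          Int.toNat_natCast]
      simp only [PySem.List.pyGetD_natCast]
      rw [getD_cumOf row ((p.1 - p.2).toNat) (by omega)]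
      rw [pymod_emod, pymod_emod, pymod_emod]
      rw [Int.add_emod res, Int.emod_emod_of_dvd _ dvd_rfl, ← Int.add_emod]
    · rw [if_neg hab]
      rw [show (p.1 - p.2 + 1).toNat = 0 from by omega]
      simp only [List.take_zero, List.sum_nil, Int.add_zero]
      exact hres.symm

-- the joint loop invariant
theorem pymod_idem (a : Int) : PySem.Int.mod (PySem.Int.mod a pvMOD) pvMOD = PySem.Int.mod a pvMOD := by
  rw [pymod_emod, pymod_emod]
  exact Int.emod_emod_of_dvd _ dvd_rfl

-- joint loop invariant: B's array is the cumulative distribution of A's current row,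
-- the two results agree, and A's result is mod-reduced
set_option maxRecDepth 8192 in
theorem loop_inv (S : List (Int × Int)) (m : Nat) (dp0 : List (List Int)) (r0 : Int)
    (hm : m ≤ S.length) (hb : ∀ p ∈ S.take m, 0 ≤ p.2 ∧ p.1 - p.2 ≤ 5000)
    (hlen : dp0.length = m + 1) (hrows : ∀ r ∈ dp0, r.length = 5001)
    (hr0 : PySem.Int.mod r0 pvMOD = r0) :
    ∀ k, k ≤ m →
      ((List.range k).foldl (AstepA (S.map (fun ab => ab.1)) (S.map (fun ab => ab.2))) (dp0, r0)).1.length = m + 1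
      ∧ (∀ r ∈ ((List.range k).foldl (AstepA (S.map (fun ab => ab.1)) (S.map (fun ab => ab.2))) (dp0, r0)).1, r.length = 5001)
      ∧ ((List.range k).foldl (fun (st : List Int × Int) (i : Nat) => BstepC st (PySem.List.pyGetD S (i : Int) (0, 0))) (cumOf (dp0.getD 0 []), r0)).1
          = cumOf (((List.range k).foldl (AstepA (S.map (fun ab => ab.1)) (S.map (fun ab => ab.2))) (dp0, r0)).1.getD k [])
      ∧ ((List.range k).foldl (AstepA (S.map (fun ab => ab.1)) (S.map (fun ab => ab.2))) (dp0, r0)).2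
          = ((List.range k).foldl (fun (st : List Int × Int) (i : Nat) => BstepC st (PySem.List.pyGetD S (i : Int) (0, 0))) (cumOf (dp0.getD 0 []), r0)).2
      ∧ PySem.Int.mod ((List.range k).foldl (AstepA (S.map (fun ab => ab.1)) (S.map (fun ab => ab.2))) (dp0, r0)).2 pvMOD
          = ((List.range k).foldl (AstepA (S.map (fun ab => ab.1)) (S.map (fun ab => ab.2))) (dp0, r0)).2 := by
  intro k
  induction k with
  | zero =>
      exact fun _ => ⟨by simpa using hlen, by simpa using hrows, rfl, rfl, hr0⟩
  | succ k ih =>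
      intro hk1
      obtain ⟨hL, hR, hcum, hres, hredu⟩ := ih (by omega)
      have hkS : k < S.length := by omega
      have hmemk : S[k] ∈ S.take m := by
        have : (S.take m)[k]'(by simp; omega) = S[k] := List.getElem_take
        rw [← this]
        exact List.getElem_mem _
      obtain ⟨hbk, hak⟩ := hb _ hmemk
      set Ak := ((List.range k).foldl (AstepA (S.map (fun ab => ab.1)) (S.map (fun ab => ab.2))) (dp0, r0)) with hAk
      set Bk := ((List.range k).foldl (fun (st : List Int × Int) (i : Nat) => BstepC st (PySem.List.pyGetD S (i : Int) (0, 0))) (cumOf (dp0.getD 0 []), r0)) with hBk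
      have hlenrowk : (Ak.1.getD k []).length = 5001 := by
        apply hR
        rw [List.getD_eq_getElem?_getD, List.getElem?_eq_getElem (by omega : k < Ak.1.length)]
        exact List.getElem_mem _
      have hlenrowk1 : (Ak.1.getD (k+1) []).length = 5001 := by
        apply hR
        rw [List.getD_eq_getElem?_getD, List.getElem?_eq_getElem (by omega : k + 1 < Ak.1.length)]
        exact List.getElem_mem _
      have hAstep : (List.range (k+1)).foldl (AstepA (S.map (fun ab => ab.1)) (S.map (fun ab => ab.2))) (dp0, r0)
          = AstepA (S.map (fun ab => ab.1)) (S.map (fun ab => ab.2)) Ak k := by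
        rw [List.range_succ, List.foldl_append, ← hAk, List.foldl_cons, List.foldl_nil]
      have hBstep : (List.range (k+1)).foldl (fun (st : List Int × Int) (i : Nat) => BstepC st (PySem.List.pyGetD S (i : Int) (0, 0))) (cumOf (dp0.getD 0 []), r0)
          = BstepC Bk S[k] := by
        rw [List.range_succ, List.foldl_append, ← hBk, List.foldl_cons, List.foldl_nil]
        rw [PySem.List.pyGetD_natCast, List.getD_eq_getElem?_getD, List.getElem?_eq_getElem hkS]
        rfl
      have hBkpair : Bk = (cumOf (Ak.1.getD k []), Ak.2) := by
        rw [show Bk = (Bk.1, Bk.2) from rfl, hcum, ← hres]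
      have hA : AstepA (S.map (fun ab => ab.1)) (S.map (fun ab => ab.2)) Ak k
          = (Ak.1.set (k+1) (rowNext (S[k].2).toNat (Ak.1.getD k [])),
             PySem.Int.mod (Ak.2 + ((Ak.1.getD k []).take ((S[k].1 - S[k].2 + 1)).toNat).sum) pvMOD) := by
        rw [show Ak = (Ak.1, Ak.2) from rfl]
        exact Astep_eq S k hkS Ak.1 Ak.2 (by omega) hlenrowk hlenrowk1 hbk
      have hB : BstepC (cumOf (Ak.1.getD k []), Ak.2) S[k]
          = (cumOf (rowNext (S[k].2).toNat (Ak.1.getD k [])),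
             PySem.Int.mod (Ak.2 + ((Ak.1.getD k []).take ((S[k].1 - S[k].2 + 1)).toNat).sum) pvMOD) := by
        exact Bstep_cum S[k] (Ak.1.getD k []) Ak.2 hlenrowk hbk hak hredu
      rw [hAstep, hBstep, hBkpair, hA, hB]
      refine ⟨by simpa using hL, ?_, ?_, rfl, pymod_idem _⟩
      · intro r hr
        rcases List.mem_or_eq_of_mem_set hr with h | h
        · exact hR r h
        · rw [h]; exact length_rowNext _ _
      · rw [getD_set_eq_if _ _ _ _ _ (by omega), if_pos rfl]

-- B's initial array [1]*5001 is the cumulative distribution of A's initial row [1,0,…,0]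
theorem cumOf_init :
    cumOf (PySem.List.pySetD (List.replicate 5001 (0:Int)) 0 1) = List.replicate 5001 1 := by
  have hrow : PySem.List.pySetD (List.replicate 5001 (0:Int)) 0 1
      = (1 : Int) :: List.replicate 5000 0 := by
    rw [PySem.List.pySetD_of_nonneg _ _ (by norm_num)]
    rw [show ((0:Int)).toNat = 0 from rfl,
      show (List.replicate 5001 (0:Int)) = 0 :: List.replicate 5000 0 from by
        rw [show (5001:Nat) = 5000+1 from by norm_num, List.replicate_succ],
      List.set_cons_zero]
  unfold cumOf
  rw [hrow]
  have h1 : ∀ c ∈ List.range 5001,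
      PySem.Int.mod ((((1 : Int) :: List.replicate 5000 0).take (c+1)).sum) pvMOD = 1 := by
    intro c _
    rw [List.take_succ_cons, List.sum_cons, List.take_replicate, List.sum_replicate]
    rw [pymod_emod]
    norm_num [pvMOD]
  rw [List.map_congr_left h1]
  simp [List.map_const']

-- ===== VERDICT (by name: the statement is the Claim_ definition above) =====
theorem solve_spec : Claim_equal_solve := by
  intro n a_list b_list _ hpre
  obtain ⟨hn, hna, hnb, hP⟩ := hpre
  unfold Spec_solve solve solve_alt
  dsimp only
  have hm1 : (n + 1).toNat = n.toNat + 1 := by omega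
  rw [hm1]
  set S := PySem.List.sorted (a_list.zip b_list) (fun x => x.1) false with hS
  set m := n.toNat with hmdef
  have hSlen : m ≤ S.length := by
    rw [hS, PySem.List.length_sorted, List.length_zip]
    omega
  set z : List Int := List.replicate 5001 0 with hz
  have hget0 : (List.replicate (m+1) z).getD 0 [] = z := by
    rw [List.getD_eq_getElem?_getD, List.getElem?_eq_getElem (by simp : 0 < (List.replicate (m+1) z).length)]
    simp
  rw [hget0]
  set dp0 : List (List Int) := (List.replicate (m+1) z).set 0 (PySem.List.pySetD z 0 1) with hdp0
  have hrow0 : dp0.getD 0 [] = PySem.List.pySetD z 0 1 := by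
    rw [hdp0, getD_set_eq_if _ _ _ _ _ (by simp), if_pos rfl]
  have hr0 : PySem.Int.mod (0 : Int) pvMOD = 0 := by
    rw [pymod_emod]
    simp
  have hinv := loop_inv S m dp0 0 hSlen hP (by rw [hdp0, List.length_set, List.length_replicate])
    (by
      intro r hr
      rcases List.mem_or_eq_of_mem_set hr with h | h
      · rw [List.eq_of_mem_replicate h, hz, List.length_replicate]
      · rw [h, PySem.List.length_pySetD, hz, List.length_replicate])
    hr0 m le_rfl
  rw [← cumOf_init, ← hz, ← hrow0]
  exact hinv.2.2.2.1
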